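-- pv_equiv track=rewrite | github.com/gikf/advent-of-code | advent-of-code-2015/day 24/main.py | get_shortest_size_groups_with_sum
-- ===== SOURCE A (Python) =====
-- from itertools import combinations
--
-- def get_shortest_size_groups_with_sum(packages, target, group_size=1):
--     """Get packages groups with lowest group_size that sum to target."""
--     while group_size < len(packages):
--         possible_combs = [combination
--                           for combination in combinations(packages, group_size)
--                           if sum(combination) == target]
--         if possible_combs:
--             return possible_combs
--         group_size += 1
--     return None
-- ===== SOURCE B (Python) =====
-- def get_shortest_size_groups_with_sum(packages, target, group_size=1):
--     """Get packages groups with lowest group_size that sum to target."""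
--     n = len(packages)
--     k = group_size
--     while k < n:
--         # Pascal-style table: one right-to-left pass over packages builds all
--         # combinations of sizes 0..k at once (prepending each element keeps
--         # itertools.combinations order); rows beyond size k are never made.
--         rows = [[()]] + [[] for _ in range(k)]
--         for x in reversed(packages):
--             rows = [rows[0]] + [[(x,) + t for t in rows[j - 1]] + rows[j]
--                                 for j in range(1, k + 1)]
--         matches = [t for t in rows[k] if sum(t) == target]
--         if matches:
--             return matches
--         k += 1
--     return None
-- ===== Notes on version B (the rewrite author's own statement) =====
-- stated objective: alternative
-- what changed: Replaces itertools-style combination enumeration with a Pascal-style dynamic-programming table: for each candidate size k one right-to-left fold over packages builds every combination of sizes 0..k simultaneously (prepending keeps itertools order), and the while loop is ported as recursion on remaining iterations instead of a well-founded Int loop.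
import Mathlib
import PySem

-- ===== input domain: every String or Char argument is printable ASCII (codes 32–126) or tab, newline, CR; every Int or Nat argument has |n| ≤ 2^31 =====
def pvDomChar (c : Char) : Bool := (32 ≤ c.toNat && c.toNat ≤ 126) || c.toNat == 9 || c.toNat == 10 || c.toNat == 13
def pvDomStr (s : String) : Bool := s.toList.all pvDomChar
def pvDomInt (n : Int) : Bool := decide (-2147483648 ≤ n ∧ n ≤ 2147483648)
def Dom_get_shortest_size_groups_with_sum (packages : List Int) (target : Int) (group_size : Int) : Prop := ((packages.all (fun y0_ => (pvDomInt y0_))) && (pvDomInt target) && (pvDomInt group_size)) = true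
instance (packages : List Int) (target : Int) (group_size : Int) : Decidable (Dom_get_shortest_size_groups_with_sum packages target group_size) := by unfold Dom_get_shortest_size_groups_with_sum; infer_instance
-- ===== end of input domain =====

-- B enumerates combinations via a Pascal-style DP table built by one right-to-left
-- fold per candidate size instead of itertools-style recursion (alternative
-- decomposition, same results).

-- ===== PORT A =====
-- itertools.combinations(xs, k): all k-element tuples in index-ascending order
def pyCombinations : List Int → Nat → List (List Int)
  | _, 0 => [[]]
  | [], _ + 1 => []
  | x :: xs, k + 1 => (pyCombinations xs k).map (x :: ·) ++ pyCombinations xs (k + 1)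

def aGo (packages : List Int) (target : Int) (gs : Int) : Option (List (List Int)) :=
  if _h : gs < (packages.length : Int) then
    let possible_combs := (pyCombinations packages gs.toNat).filter (fun c => c.sum == target)
    if possible_combs.isEmpty then aGo packages target (gs + 1) else some possible_combs
  else none
termination_by ((packages.length : Int) - gs).toNat
decreasing_by omega

def get_shortest_size_groups_with_sum (packages : List Int) (target : Int) (group_size : Int) : Option (List (List Int)) :=
  aGo packages target group_size

-- ===== PORT B =====
-- one table update: new rows[j] = [(x,)+t for t in rows[j-1]] + rows[j]
def bShift (x : Int) : List (List Int) → List (List (List Int)) → List (List (List Int))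
  | _, [] => []
  | prev, r :: rs => (prev.map (x :: ·) ++ r) :: bShift x r rs

def bStep (x : Int) : List (List (List Int)) → List (List (List Int))
  | [] => []
  | r0 :: rest => r0 :: bShift x r0 rest

-- while-loop ported as recursion on the number of remaining iterations
def bLoop (packages : List Int) (target : Int) : Nat → Int → Option (List (List Int))
  | 0, _ => none
  | fuel + 1, k =>
    let rows := packages.foldr bStep ([[]] :: List.replicate k.toNat [])
    let ms := (rows.getD k.toNat []).filter (fun t => t.sum == target)
    if ms.isEmpty then bLoop packages target fuel (k + 1) else some ms

def get_shortest_size_groups_with_sum_alt (packages : List Int) (target : Int) (group_size : Int) : Option (List (List Int)) :=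
  bLoop packages target ((packages.length : Int) - group_size).toNat group_size

-- ===== PRECONDITION & SPEC =====
-- Pre_ excludes negative group_size, on which Python A raises ValueError
-- (itertools.combinations requires a non-negative r).
def Pre_get_shortest_size_groups_with_sum (packages : List Int) (target : Int) (group_size : Int) : Prop := 0 ≤ group_size
instance (packages : List Int) (target : Int) (group_size : Int) : Decidable (Pre_get_shortest_size_groups_with_sum packages target group_size) := by unfold Pre_get_shortest_size_groups_with_sum; infer_instance
def pvWitness_get_shortest_size_groups_with_sum : List Int × Int × Int := ([1, 2, 3], 3, 1)

def Spec_get_shortest_size_groups_with_sum (packages : List Int) (target : Int) (group_size : Int) (out : Option (List (List Int))) : Prop := out = get_shortest_size_groups_with_sum_alt packages target group_size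
instance (packages : List Int) (target : Int) (group_size : Int) (out : Option (List (List Int))) : Decidable (Spec_get_shortest_size_groups_with_sum packages target group_size out) := by unfold Spec_get_shortest_size_groups_with_sum; infer_instance

-- ===== CLAIM (what is proved, stated in full; the proofs are below) =====
def Claim_equal_get_shortest_size_groups_with_sum : Prop := ∀ (packages : List Int) (target : Int) (group_size : Int), Dom_get_shortest_size_groups_with_sum packages target group_size → Pre_get_shortest_size_groups_with_sum packages target group_size → Spec_get_shortest_size_groups_with_sum packages target group_size (get_shortest_size_groups_with_sum packages target group_size)

-- ===== LEMMAS AND PROOFS =====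
lemma pyCombinations_zero (xs : List Int) : pyCombinations xs 0 = [[]] := by
  cases xs <;> rfl

lemma pyCombinations_nil_pos (k : Nat) (hk : 1 ≤ k) : pyCombinations [] k = [] := by
  cases k with
  | zero => omega
  | succ c => rfl

lemma map_comb_nil : ∀ (m k : Nat), 1 ≤ k →
    (List.range' k m).map (fun j => pyCombinations [] j) = List.replicate m [] := by
  intro m
  induction m with
  | zero => intro k _; rfl
  | succ m ih =>
    intro k hk
    rw [List.range'_succ, List.map_cons, pyCombinations_nil_pos k hk, ih (k + 1) (by omega)]
    rfl

lemma bShift_map (x : Int) (f : Nat → List (List Int)) :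
    ∀ (m k : Nat), bShift x (f k) ((List.range' (k + 1) m).map f)
      = (List.range' (k + 1) m).map (fun j => (f (j - 1)).map (x :: ·) ++ f j) := by
  intro m
  induction m with
  | zero => intro k; rfl
  | succ m ih =>
    intro k
    rw [List.range'_succ, List.map_cons, List.map_cons, bShift]
    rw [ih (k + 1)]
    simp

lemma bStep_comb (x : Int) (xs : List Int) (m : Nat) :
    bStep x ((List.range' 0 (m + 1)).map (fun k => pyCombinations xs k))
      = (List.range' 0 (m + 1)).map (fun k => pyCombinations (x :: xs) k) := by
  rw [List.range'_succ, List.map_cons, List.map_cons, bStep]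
  congr 1
  · rw [pyCombinations_zero xs, pyCombinations_zero (x :: xs)]
  rw [bShift_map x (fun k => pyCombinations xs k) m 0]
  apply List.map_congr_left
  intro j hj
  have hj1 : 1 ≤ j := by
    have := List.mem_range'.mp hj
    omega
  obtain ⟨c, rfl⟩ : ∃ c, j = c + 1 := ⟨j - 1, by omega⟩
  simp only [Nat.add_sub_cancel]
  rfl

lemma rows_eq : ∀ (xs : List Int) (m : Nat),
    xs.foldr bStep ([[]] :: List.replicate m []) = (List.range' 0 (m + 1)).map (fun k => pyCombinations xs k) := by
  intro xs
  induction xs with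
  | nil =>
    intro m
    rw [List.range'_succ, List.map_cons]
    rw [map_comb_nil m 1 (by omega)]
    rfl
  | cons x xs ih =>
    intro m
    rw [List.foldr_cons, ih m, bStep_comb]

lemma getD_map_range (f : Nat → List (List Int)) (d : List (List Int)) :
    ∀ (m s : Nat), ((List.range' s (m + 1)).map f).getD m d = f (s + m) := by
  intro m
  induction m with
  | zero => intro s; rfl
  | succ m ih =>
    intro s
    rw [List.range'_succ, List.map_cons]
    show ((List.range' (s + 1) (m + 1)).map f).getD m d = _
    rw [ih (s + 1)]
    congr 1
    omega

lemma loop_eq (packages : List Int) (target : Int) :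
    ∀ (fuel : Nat) (k : Int), fuel = ((packages.length : Int) - k).toNat →
      bLoop packages target fuel k = aGo packages target k := by
  intro fuel
  induction fuel with
  | zero =>
    intro k hk
    rw [bLoop, aGo, dif_neg (by omega)]
  | succ fuel ih =>
    intro k hk
    have hklt : k < (packages.length : Int) := by omega
    rw [bLoop, aGo, dif_pos hklt]
    have hrow : (packages.foldr bStep ([[]] :: List.replicate k.toNat [])).getD k.toNat []
        = pyCombinations packages k.toNat := by
      rw [rows_eq packages k.toNat, getD_map_range, Nat.zero_add]
    simp only [hrow]
    by_cases hemp : ((pyCombinations packages k.toNat).filter (fun c => c.sum == target)).isEmpty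
    · rw [if_pos hemp, if_pos hemp, ih (k + 1) (by omega)]
    · rw [if_neg hemp, if_neg hemp]

-- ===== VERDICT (by name: the statement is the Claim_ definition above) =====
theorem get_shortest_size_groups_with_sum_spec : Claim_equal_get_shortest_size_groups_with_sum := by
  intro packages target group_size _ _
  unfold Spec_get_shortest_size_groups_with_sum get_shortest_size_groups_with_sum get_shortest_size_groups_with_sum_alt
  exact (loop_eq packages target _ group_size rfl).symm ▸ rfl
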